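-- pv_equiv track=rewrite | github.com/aws-samples/aws-cudos-framework-deployment | cid/helpers/diff.py | diff_2_cid_print
-- ===== SOURCE A (Python) =====
-- def diff_2_cid_print(lines):
--     """ convert ndiff to printable color format """
--     new_lines = []
--     next_line_chars = []
--     for line in lines.splitlines()[::-1]:
--         color = 'END'
--         new_line = ''
--         if line.startswith('-'):
--             color = 'RED'
--         elif line.startswith('+'):
--             color = 'GREEN'
--         elif line.startswith(' '):
--             color = 'GREY'
--
--         if not line.startswith('?'):
--             new_line = f'<{color}>'
--             bold = False
--             last_bold = False
--             for i, c in enumerate(line):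
--                 bold = (i in next_line_chars)
--
--                 if bold and not last_bold:
--                     new_line += f'<BOLD><{color}>'
--                 if last_bold and not bold:
--                     new_line += f'<END><{color}>'
--                 new_line += c
--                 last_bold = bold
--             new_line += '<END>'
--             next_line_chars = []
--         else:
--             next_line_chars = []
--             for i, c in enumerate(line):
--                 if c not in [' ', '?']:
--                     next_line_chars.append(i)
--         new_lines.append(new_line)
--     return ('\n'.join(new_lines[::-1]))
-- ===== SOURCE B (Python) =====
-- def diff_2_cid_print(lines):
--     """ convert ndiff to printable color format """
--     split = lines.splitlines()
--     out = []
--     for j, line in enumerate(split):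
--         if line.startswith('?'):
--             out.append('')
--             continue
--         color = {'-': 'RED', '+': 'GREEN', ' ': 'GREY'}.get(line[:1], 'END')
--         runs = []
--         if j + 1 < len(split) and split[j + 1].startswith('?'):
--             for i, c in enumerate(split[j + 1]):
--                 if c in ' ?':
--                     continue
--                 if runs and runs[-1][1] == i:
--                     runs[-1] = (runs[-1][0], i + 1)
--                 else:
--                     runs.append((i, i + 1))
--         pieces = [f'<{color}>']
--         pos = 0
--         for start, end in runs:
--             if start >= len(line):
--                 break
--             pieces.append(line[pos:start])
--             pieces.append(f'<BOLD><{color}>')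
--             pieces.append(line[start:end])
--             if end < len(line):
--                 pieces.append(f'<END><{color}>')
--             pos = end
--         pieces.append(line[pos:])
--         pieces.append('<END>')
--         out.append(''.join(pieces))
--     return '\n'.join(out)
-- ===== Notes on version B (the rewrite author's own statement) =====
-- stated objective: faster
-- what changed: A walks the split lines in reverse carrying the hint line's bold indices as a mutable list and builds each line's markup char-by-char with a per-char membership scan of that list and a last_bold flag; B walks forward, parses each hint line into contiguous (start, end) runs by extending the last run, and assembles the markup by slicing the line at run boundaries, wrapping whole bold segments at once with no membership tests.
import Mathlib
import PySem

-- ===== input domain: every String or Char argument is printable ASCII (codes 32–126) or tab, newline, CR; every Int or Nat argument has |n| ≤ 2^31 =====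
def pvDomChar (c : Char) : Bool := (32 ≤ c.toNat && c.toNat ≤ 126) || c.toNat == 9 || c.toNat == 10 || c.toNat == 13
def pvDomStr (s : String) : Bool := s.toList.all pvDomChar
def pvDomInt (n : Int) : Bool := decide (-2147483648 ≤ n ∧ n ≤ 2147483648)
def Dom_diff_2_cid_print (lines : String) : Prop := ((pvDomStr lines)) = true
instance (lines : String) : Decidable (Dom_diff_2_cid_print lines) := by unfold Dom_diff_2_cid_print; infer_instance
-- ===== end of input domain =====

-- B replaces A's reversed char-by-char pass (carried hint state, last_bold flag, per-char membership
-- scan of the marked-index list) by a forward pass that parses each hint line into contiguous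
-- (start, end) runs and assembles the markup by SLICING the line at run boundaries: an interval-based
-- decomposition with the same output that avoids the per-char membership scans.

-- ===== PORT A =====
-- A-side helpers: the color chain, the '?'-line index collection, and the inner char loop's step.
def pvColorA (line : List Char) : List Char :=
  if PySem.Chars.startswith line ['-'] then "RED".toList
  else if PySem.Chars.startswith line ['+'] then "GREEN".toList
  else if PySem.Chars.startswith line [' '] then "GREY".toList
  else "END".toList

def pvMarksA (line : List Char) : List Int :=
  (PySem.List.enumerate line).foldl
    (fun acc ic => if !([' ', '?'] : List Char).contains ic.2 then acc ++ [ic.1] else acc) []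

def pvInnerStepA (ncs : List Int) (color : List Char) (ac : List Char × Bool) (ic : Int × Char) :
    List Char × Bool :=
  let bold := ncs.contains ic.1
  (ac.1 ++ (if bold && !ac.2 then "<BOLD><".toList ++ color ++ ">".toList else [])
        ++ (if ac.2 && !bold then "<END><".toList ++ color ++ ">".toList else [])
        ++ [ic.2],
   bold)

def pvStepA (st : List (List Char) × List Int) (line : List Char) : List (List Char) × List Int :=
  let color := pvColorA line
  if !PySem.Chars.startswith line ['?'] then
    let inner := (PySem.List.enumerate line).foldl (pvInnerStepA st.2 color)
      ("<".toList ++ color ++ ">".toList, false)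
    (st.1 ++ [inner.1 ++ "<END>".toList], [])
  else
    (st.1 ++ [[]], pvMarksA line)

def diff_2_cid_print (lines : String) : String :=
  let ls := PySem.Chars.splitlines lines.toList
  let fin := ls.reverse.foldl pvStepA ([], [])
  String.ofList (PySem.Chars.join ['\n'] fin.1.reverse)

-- ===== PORT B =====
-- B-side helpers: dict color lookup, run extraction from a hint line (extend the last run when the
-- marked index is contiguous, else open a new unit run), and slice-based assembly over the runs.
def pvColorB (line : List Char) : List Char :=
  PySem.Dict.getD
    (((PySem.Dict.empty.insert ['-'] "RED".toList).insert ['+'] "GREEN".toList).insert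
      [' '] "GREY".toList)
    (PySem.List.slice line none (some 1)) "END".toList

def pvRunStepB (acc : List (Int × Int)) (ic : Int × Char) : List (Int × Int) :=
  if ([' ', '?'] : List Char).contains ic.2 then acc
  else
    match acc.getLast? with
    | some p => if p.2 = ic.1 then acc.dropLast ++ [(p.1, ic.1 + 1)] else acc ++ [(ic.1, ic.1 + 1)]
    | none => acc ++ [(ic.1, ic.1 + 1)]

def pvRunsB (hint : List Char) : List (Int × Int) :=
  (PySem.List.enumerate hint).foldl pvRunStepB []

def pvEmitB (color line : List Char) : List (Int × Int) → Int → List Char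
  | [], pos => PySem.List.slice line (some pos) none
  | (s, e) :: rs, pos =>
    if (line.length : Int) ≤ s then PySem.List.slice line (some pos) none
    else
      PySem.List.slice line (some pos) (some s)
        ++ "<BOLD><".toList ++ color ++ ">".toList
        ++ PySem.List.slice line (some s) (some e)
        ++ (if e < (line.length : Int) then "<END><".toList ++ color ++ ">".toList else [])
        ++ pvEmitB color line rs e

def pvRenderLineB (line : List Char) (runs : List (Int × Int)) : List Char :=
  let color := pvColorB line
  "<".toList ++ color ++ ">".toList ++ pvEmitB color line runs 0 ++ "<END>".toList

def pvNextRuns : List (List Char) → List (Int × Int)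
  | h :: _ => if PySem.Chars.startswith h ['?'] then pvRunsB h else []
  | [] => []

def pvOutB : List (List Char) → List (List Char)
  | [] => []
  | l :: rest =>
    (if PySem.Chars.startswith l ['?'] then []
     else pvRenderLineB l (pvNextRuns rest)) :: pvOutB rest

def diff_2_cid_print_alt (lines : String) : String :=
  String.ofList (PySem.Chars.join ['\n'] (pvOutB (PySem.Chars.splitlines lines.toList)))

-- ===== PRECONDITION & SPEC =====
def Spec_diff_2_cid_print (lines : String) (out : String) : Prop := out = diff_2_cid_print_alt lines
instance (lines : String) (out : String) : Decidable (Spec_diff_2_cid_print lines out) := by unfold Spec_diff_2_cid_print; infer_instance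

-- ===== CLAIM (what is proved, stated in full; the proofs are below) =====
def Claim_equal_diff_2_cid_print : Prop := ∀ (lines : String), Dom_diff_2_cid_print lines → Spec_diff_2_cid_print lines (diff_2_cid_print lines)

-- ===== LEMMAS AND PROOFS =====

-- what a single char contributes, phrased by a membership function m
def pvPre (b prev : Bool) (color : List Char) : List Char :=
  if b then (if !prev then "<BOLD><".toList ++ color ++ ">".toList else [])
  else (if prev then "<END><".toList ++ color ++ ">".toList else [])

def pvBodyM (m : Int → Bool) (color : List Char) (ic : Int × Char) : List Char :=
  pvPre (m ic.1) (m (ic.1 - 1)) color ++ [ic.2]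

-- the marks list carried by A from the '?' line below (empty when that line is not a '?' line)
def pvCarry (l : List Char) : List Int :=
  if PySem.Chars.startswith l ['?'] then pvMarksA l else []

def pvC0 : List (List Char) → List Int
  | [] => []
  | l :: _ => pvCarry l

-- A's per-line outputs as a forward recursion (proof device)
def pvAL : List (List Char) → List (List Char)
  | [] => []
  | l :: rest =>
    (if PySem.Chars.startswith l ['?'] then []
     else "<".toList ++ pvColorA l ++ ">".toList
       ++ (PySem.List.enumerate l).flatMap (pvBodyM (fun i => (pvC0 rest).contains i) (pvColorA l))
       ++ "<END>".toList) :: pvAL rest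

-- interval membership and well-formedness of a run list
def pvMemb (rs : List (Int × Int)) (i : Int) : Bool := rs.any (fun p => p.1 ≤ i && i < p.2)

def pvWF : Int → List (Int × Int) → Prop
  | _, [] => True
  | lo, p :: rs => lo ≤ p.1 ∧ p.1 < p.2 ∧ pvWF (p.2 + 1) rs

def pvEndsLe (rs : List (Int × Int)) (k : Int) : Prop := ∀ p ∈ rs, p.2 ≤ k

lemma pvMemb_cons (p : Int × Int) (rs : List (Int × Int)) (i : Int) :
    pvMemb (p :: rs) i = ((decide (p.1 ≤ i) && decide (i < p.2)) || pvMemb rs i) := rfl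


lemma pvMemb_cons_false {s e i : Int} {rs : List (Int × Int)}
    (h1 : ¬(s ≤ i ∧ i < e)) (h2 : pvMemb rs i = false) : pvMemb ((s, e) :: rs) i = false := by
  rw [pvMemb_cons, h2]
  simp only [Bool.or_false, Bool.and_eq_false_iff, decide_eq_false_iff_not]
  omega

lemma pvMemb_cons_true {s e i : Int} {rs : List (Int × Int)}
    (h1 : s ≤ i) (h2 : i < e) : pvMemb ((s, e) :: rs) i = true := by
  rw [pvMemb_cons]
  simp [h1, h2]

lemma pvColorB_eq (line : List Char) : pvColorB line = pvColorA line := by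
  cases line with
  | nil => rfl
  | cons c r =>
    have h1 : PySem.List.slice (c::r) none (some 1) = [c] := by
      simpa using PySem.List.slice_to_natCast (c::r) 1
    unfold pvColorA pvColorB
    rw [h1, PySem.Dict.getD_insert, PySem.Dict.getD_insert, PySem.Dict.getD_insert]
    simp [PySem.Chars.startswith, List.isPrefixOf, PySem.Dict.getD_empty]
    by_cases h3 : c = ' ' <;> by_cases h2 : c = '+' <;> by_cases h : c = '-' <;> simp_all [eq_comm]

lemma pvMarksA_eq_filter (line : List Char) :
    pvMarksA line
      = ((PySem.List.enumerate line).filter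
          (fun ic => !([' ', '?'] : List Char).contains ic.2)).map (·.1) := by
  unfold pvMarksA
  simpa using PySem.List.foldl_append_if
    (fun ic => !([' ', '?'] : List Char).contains ic.2) (fun ic => ic.1)
    (PySem.List.enumerate line) []

lemma pvMarksA_nonneg (line : List Char) : ∀ x ∈ pvMarksA line, 0 ≤ x := by
  intro x hx
  rw [pvMarksA_eq_filter] at hx
  obtain ⟨p, hp, rfl⟩ := List.mem_map.mp hx
  have hp' := List.mem_of_mem_filter hp
  obtain ⟨k, hk, rfl⟩ := (PySem.List.mem_enumerate_iff _ _ _).mp hp'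
  simp

lemma pvC0_nonneg (ls : List (List Char)) : ∀ x ∈ pvC0 ls, 0 ≤ x := by
  cases ls with
  | nil => simp [pvC0]
  | cons l rest =>
    show ∀ x ∈ pvCarry l, 0 ≤ x
    unfold pvCarry
    split
    · exact pvMarksA_nonneg l
    · simp

-- A's stateful char loop equals the stateless per-index flatMap
lemma pvInner_eq (ncs : List Int) (m : Int → Bool) (color : List Char)
    (hm : ∀ i, m i = ncs.contains i) :
    ∀ (cs : List Char) (s : Int) (acc : List Char) (last : Bool),
      last = ncs.contains (s - 1) →
      ((PySem.List.enumerate cs s).foldl (pvInnerStepA ncs color) (acc, last)).1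
        = acc ++ (PySem.List.enumerate cs s).flatMap (pvBodyM m color) := by
  intro cs
  induction cs with
  | nil => intro s acc last _; simp [PySem.List.enumerate]
  | cons c cs ih =>
    intro s acc last hlast
    rw [PySem.List.enumerate_cons]
    simp only [List.foldl_cons, List.flatMap_cons]
    have hstep : pvInnerStepA ncs color (acc, last) (s, c)
        = (acc ++ pvBodyM m color (s, c), ncs.contains s) := by
      unfold pvInnerStepA pvBodyM pvPre
      simp only [hm]
      rw [← hlast]
      cases hb : ncs.contains s <;> cases last <;> simp [List.append_assoc]
    rw [hstep]
    have hnext : ncs.contains s = ncs.contains (s + 1 - 1) := by norm_num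
    rw [ih (s + 1) (acc ++ pvBodyM m color (s, c)) (ncs.contains s) hnext]
    simp [List.append_assoc]

-- A's reversed fold, characterised by the forward recursion pvAL
lemma pvFold_eq (ls : List (List Char)) :
    ls.reverse.foldl pvStepA ([], []) = ((pvAL ls).reverse, pvC0 ls) := by
  induction ls with
  | nil => rfl
  | cons l rest ih =>
    rw [List.reverse_cons, List.foldl_append, ih]
    cases hq : PySem.Chars.startswith l ['?'] with
    | true => simp [pvStepA, hq, pvAL, pvC0, pvCarry]
    | false =>
      have hneg : (pvC0 rest).contains (-1) = false := by
        cases h : (pvC0 rest).contains (-1) with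
        | false => rfl
        | true =>
          exfalso
          have hmem : (-1 : Int) ∈ pvC0 rest := by simpa using h
          have := pvC0_nonneg rest (-1) hmem
          omega
      have hin := pvInner_eq (pvC0 rest) (fun i => (pvC0 rest).contains i) (pvColorA l)
        (fun i => rfl) l 0 ("<".toList ++ pvColorA l ++ ">".toList) false
        (by simpa using hneg.symm)
      have hstep : pvStepA ((pvAL rest).reverse, pvC0 rest) l
          = ((pvAL rest).reverse ++ ["<".toList ++ pvColorA l ++ ">".toList
              ++ (PySem.List.enumerate l).flatMap
                  (pvBodyM (fun i => (pvC0 rest).contains i) (pvColorA l))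
              ++ "<END>".toList], []) := by
        unfold pvStepA
        rw [hq]
        simp only [Bool.not_false, if_pos]
        rw [hin]
      simp only [List.foldl_cons, List.foldl_nil]
      rw [hstep]
      have hc : pvC0 (l :: rest) = [] := by simp [pvC0, pvCarry, hq]
      rw [hc]
      have ha : pvAL (l :: rest)
          = ("<".toList ++ pvColorA l ++ ">".toList
              ++ (PySem.List.enumerate l).flatMap
                  (pvBodyM (fun i => (pvC0 rest).contains i) (pvColorA l))
              ++ "<END>".toList) :: pvAL rest := by
        rw [pvAL, if_neg (by simp [hq])]
      rw [ha, List.reverse_cons]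

-- well-formedness basics
lemma pvWF_mono (rs : List (Int × Int)) (lo lo' : Int) (h : lo' ≤ lo) (hwf : pvWF lo rs) :
    pvWF lo' rs := by
  cases rs with
  | nil => trivial
  | cons p rs => exact ⟨le_trans h hwf.1, hwf.2.1, hwf.2.2⟩

lemma pvWF_mem_lo : ∀ (rs : List (Int × Int)) (lo : Int), pvWF lo rs →
    ∀ p ∈ rs, lo ≤ p.1 ∧ p.1 < p.2 := by
  intro rs
  induction rs with
  | nil => intro lo _ p hp; simp at hp
  | cons q rs ih =>
    intro lo hwf p hp
    rcases List.mem_cons.mp hp with rfl | hp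
    · exact ⟨hwf.1, hwf.2.1⟩
    · have h := ih (q.2 + 1) hwf.2.2 p hp
      have h1 := hwf.1
      have h2 := hwf.2.1
      exact ⟨by omega, h.2⟩

lemma pvMemb_false_of_lt (rs : List (Int × Int)) (lo i : Int) (hwf : pvWF lo rs) (hi : i < lo) :
    pvMemb rs i = false := by
  simp only [pvMemb, List.any_eq_false, Bool.and_eq_true, decide_eq_true_eq, not_and]
  intro p hp h1
  have := pvWF_mem_lo rs lo hwf p hp
  omega

lemma pvWF_extend : ∀ (bs : List (Int × Int)) (lo s e e' : Int),
    pvWF lo (bs ++ [(s, e)]) → s < e' → pvWF lo (bs ++ [(s, e')]) := by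
  intro bs
  induction bs with
  | nil => intro lo s e e' hwf h; exact ⟨hwf.1, h, trivial⟩
  | cons p bs ih =>
    intro lo s e e' hwf h
    exact ⟨hwf.1, hwf.2.1, ih _ _ _ _ hwf.2.2 h⟩

lemma pvWF_snoc : ∀ (bs : List (Int × Int)) (lo k k' : Int),
    pvWF lo bs → lo ≤ k →
    (∀ p, bs.getLast? = some p → p.2 < k) → k < k' →
    pvWF lo (bs ++ [(k, k')]) := by
  intro bs
  induction bs with
  | nil => intro lo k k' _ h1 _ h2; exact ⟨h1, h2, trivial⟩
  | cons p bs ih =>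
    intro lo k k' hwf h1 hlast h2
    refine ⟨hwf.1, hwf.2.1, ih (p.2 + 1) k k' hwf.2.2 ?_ ?_ h2⟩
    · cases hbs : bs with
      | nil => have := hlast p (by simp [hbs]); omega
      | cons q bs' =>
        subst hbs
        have hr : (q :: bs').getLast? = some ((q :: bs').getLast (by simp)) :=
          List.getLast?_eq_some_getLast (by simp)
        have h5 := hlast ((q :: bs').getLast (by simp)) (by rw [List.getLast?_cons_cons]; exact hr)
        have h6 := pvWF_mem_lo _ _ hwf.2.2 ((q :: bs').getLast (by simp)) (List.getLast_mem _)
        omega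
    · intro q hq
      apply hlast
      cases bs with
      | nil => simp at hq
      | cons r bs' => rw [List.getLast?_cons_cons]; exact hq

-- flatMap over a constant-membership segment
lemma pvFlat_const : ∀ (cs : List Char) (s : Int) (m : Int → Bool) (b : Bool) (color : List Char),
    (∀ i, s ≤ i → i < s + cs.length → m i = b) →
    (PySem.List.enumerate cs s).flatMap (pvBodyM m color)
      = (if cs.isEmpty then [] else pvPre b (m (s - 1)) color) ++ cs := by
  intro cs
  induction cs with
  | nil => intro s m b color _; simp [PySem.List.enumerate]
  | cons c cs ih =>
    intro s m b color h
    rw [PySem.List.enumerate_cons, List.flatMap_cons]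
    have hs : m s = b := h s le_rfl (by simp only [List.length_cons]; push_cast; omega)
    have hrec := ih (s + 1) m b color
      (fun i h1 h2 => h i (by omega) (by simp only [List.length_cons]; push_cast at h2 ⊢; omega))
    rw [hrec]
    have hsb : m (s + 1 - 1) = b := by simpa using hs
    rw [hsb]
    have hbb : pvPre b b color = [] := by cases b <;> simp [pvPre]
    simp [pvBodyM, hs, hbb, List.append_assoc]

-- flatMap only consults m on [s-1, ∞)
lemma pvFlat_cong : ∀ (cs : List Char) (s : Int) (m m' : Int → Bool) (color : List Char),
    (∀ i, s - 1 ≤ i → m i = m' i) →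
    (PySem.List.enumerate cs s).flatMap (pvBodyM m color)
      = (PySem.List.enumerate cs s).flatMap (pvBodyM m' color) := by
  intro cs
  induction cs with
  | nil => intro s m m' color _; simp [PySem.List.enumerate]
  | cons c cs ih =>
    intro s m m' color h
    rw [PySem.List.enumerate_cons, List.flatMap_cons, List.flatMap_cons]
    rw [ih (s + 1) m m' color (fun i hi => h i (by omega))]
    simp [pvBodyM, h s (by omega), h (s - 1) (by omega)]

lemma pvEmit_nil_of_ge (color line : List Char) :
    ∀ (rs : List (Int × Int)) (pos : Int), pvWF pos rs → (line.length : Int) ≤ pos →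
      pvEmitB color line rs pos = [] := by
  intro rs pos hwf hpos
  have h0 : 0 ≤ pos := le_trans (by positivity) hpos
  have hslice : PySem.List.slice line (some pos) none = [] := by
    rw [PySem.List.slice_from line h0]
    exact List.drop_eq_nil_of_le (by omega)
  cases rs with
  | nil => simpa [pvEmitB]
  | cons p rs =>
    obtain ⟨s, e⟩ := p
    have hle : (line.length : Int) ≤ s := le_trans hpos hwf.1
    simp [pvEmitB, hle, hslice]

-- the main emit lemma: slice-by-runs equals char-by-char flatMap
lemma pvEmit_eq (color line : List Char) :
    ∀ (rs : List (Int × Int)) (pos : Int) (m : Int → Bool), 0 ≤ pos → pvWF pos rs →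
      (∀ i, pos ≤ i → m i = pvMemb rs i) → m (pos - 1) = false →
      pvEmitB color line rs pos
        = (PySem.List.enumerate (line.drop pos.toNat) pos).flatMap (pvBodyM m color) := by
  intro rs
  induction rs with
  | nil =>
    intro pos m h0 _ hm hprev
    rw [pvEmitB, PySem.List.slice_from line h0]
    rw [pvFlat_const _ pos m false color
      (fun i h1 _ => by rw [hm i h1]; rfl)]
    simp [hprev, pvPre]
  | cons p rs ih =>
    obtain ⟨s, e⟩ := p
    intro pos m h0 hwf hm hprev
    obtain ⟨hps, hse, hwf'⟩ := hwf
    have hps : pos ≤ s := hps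
    have hse : s < e := hse
    have hwf' : pvWF (e + 1) rs := hwf'
    by_cases hbig : (line.length : Int) ≤ s
    · rw [pvEmitB, if_pos hbig, PySem.List.slice_from line h0]
      rw [pvFlat_const _ pos m false color ?_]
      · simp [hprev, pvPre]
      · intro i h1 h2
        simp only [List.length_drop] at h2
        have his : i < s := by omega
        rw [hm i h1]
        exact pvMemb_cons_false (by omega)
          (pvMemb_false_of_lt rs (e + 1) i hwf' (by omega))
    · rw [not_le] at hbig
      -- notation
      have h0s : 0 ≤ s := by omega
      have h0e : 0 ≤ e := by omega
      have hmprev_s : m (s - 1) = false := by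
        by_cases hsp : s = pos
        · simpa [hsp] using hprev
        · rw [hm (s - 1) (by omega)]
          exact pvMemb_cons_false (by omega)
            (pvMemb_false_of_lt rs (e + 1) (s - 1) hwf' (by omega))
      -- split the suffix at s and at e
      have hsplit1 : line.drop pos.toNat
          = (line.drop pos.toNat).take (s.toNat - pos.toNat) ++ line.drop s.toNat := by
        have hx : line.drop s.toNat = (line.drop pos.toNat).drop (s.toNat - pos.toNat) := by
          rw [List.drop_drop]
          congr 1
          omega
        rw [hx, List.take_append_drop]
      have hsplit2 : line.drop s.toNat
          = (line.drop s.toNat).take (e.toNat - s.toNat) ++ line.drop e.toNat := by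
        have hx : line.drop e.toNat = (line.drop s.toNat).drop (e.toNat - s.toNat) := by
          rw [List.drop_drop]
          congr 1
          omega
        rw [hx, List.take_append_drop]
      have hgaplen : (((line.drop pos.toNat).take (s.toNat - pos.toNat)).length : Int)
          = s - pos := by
        simp only [List.length_take, List.length_drop]
        push_cast
        omega
      have hboldlen : (((line.drop s.toNat).take (e.toNat - s.toNat)).length : Int)
          = min e (line.length : Int) - s := by
        simp only [List.length_take, List.length_drop]
        push_cast
        omega
      -- rewrite RHS as three flatMaps
      conv_rhs => rw [hsplit1, PySem.List.enumerate_append, List.flatMap_append]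
      conv_rhs => rw [hsplit2, PySem.List.enumerate_append, List.flatMap_append]
      rw [hgaplen]
      have hs1 : pos + (s - pos) = s := by omega
      rw [hs1, hboldlen]
      -- gap part
      have hgap : (PySem.List.enumerate ((line.drop pos.toNat).take (s.toNat - pos.toNat)) pos).flatMap
            (pvBodyM m color) = (line.drop pos.toNat).take (s.toNat - pos.toNat) := by
        rw [pvFlat_const _ pos m false color ?_]
        · simp [hprev, pvPre]
        · intro i h1 h2
          rw [hgaplen] at h2
          rw [hm i h1]
          exact pvMemb_cons_false (by omega)
            (pvMemb_false_of_lt rs (e + 1) i hwf' (by omega))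
      -- bold part
      have hbnonnil : ((line.drop s.toNat).take (e.toNat - s.toNat)).isEmpty = false := by
        rw [List.isEmpty_eq_false_iff, ← List.length_pos_iff]
        simp only [List.length_take, List.length_drop]
        omega
      have hbold : (PySem.List.enumerate ((line.drop s.toNat).take (e.toNat - s.toNat)) s).flatMap
            (pvBodyM m color)
          = "<BOLD><".toList ++ color ++ ">".toList
            ++ (line.drop s.toNat).take (e.toNat - s.toNat) := by
        rw [pvFlat_const _ s m true color ?_]
        · simp [hbnonnil, hmprev_s, pvPre]
        · intro i h1 h2
          rw [hboldlen] at h2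
          rw [hm i (by omega)]
          exact pvMemb_cons_true (by omega) (by omega)
      rw [hgap, hbold]
      -- tail part
      by_cases hel : e < (line.length : Int)
      · -- nonempty tail, starts with the closing char
        have hs2 : s + (min e (line.length : Int) - s) = e := by omega
        rw [hs2]
        obtain ⟨c, cs', hrest⟩ : ∃ c cs', line.drop e.toNat = c :: cs' := by
          cases hdrop : line.drop e.toNat with
          | nil =>
            exfalso
            have := congrArg List.length hdrop
            simp only [List.length_drop, List.length_nil] at this
            omega
          | cons c cs' => exact ⟨c, cs', rfl⟩
        have hme : m e = false := by
          rw [hm e (by omega)]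
          exact pvMemb_cons_false (by omega)
            (pvMemb_false_of_lt rs (e + 1) e hwf' (by omega))
        have hme1 : m (e - 1) = true := by
          rw [hm (e - 1) (by omega)]
          exact pvMemb_cons_true (by omega) (by omega)
        -- flip m at e-1 to restore the recursion invariant
        have hflip : (PySem.List.enumerate (line.drop e.toNat) e).flatMap (pvBodyM m color)
            = "<END><".toList ++ color ++ ">".toList
              ++ (PySem.List.enumerate (line.drop e.toNat) e).flatMap
                  (pvBodyM (fun i => if i = e - 1 then false else m i) color) := by
          rw [hrest, PySem.List.enumerate_cons, List.flatMap_cons, List.flatMap_cons]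
          have hhead : pvBodyM m color (e, c)
              = "<END><".toList ++ color ++ ">".toList ++ [c] := by
            simp [pvBodyM, pvPre, hme, hme1]
          have hhead' : pvBodyM (fun i => if i = e - 1 then false else m i) color (e, c) = [c] := by
            have : (if e = e - 1 then false else m e) = false := by
              rw [if_neg (by omega)]; exact hme
            simp [pvBodyM, pvPre, this]
          rw [hhead, hhead']
          rw [pvFlat_cong cs' (e + 1) m (fun i => if i = e - 1 then false else m i) color
            (fun i hi => by
              show m i = if i = e - 1 then false else m i
              rw [if_neg (by omega)])]
          simp [List.append_assoc]
        rw [hflip]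
        have hrec := ih e (fun i => if i = e - 1 then false else m i) (by omega)
          (pvWF_mono rs (e + 1) e (by omega) hwf')
          (fun i hi => by
            show (if i = e - 1 then false else m i) = pvMemb rs i
            rw [if_neg (by omega), hm i (by omega), pvMemb_cons]
            have hde : decide (i < e) = false := by simp only [decide_eq_false_iff_not]; omega
            simp [hde])
          (by simp)
        rw [← hrec]
        rw [pvEmitB, if_neg (by omega)]
        have hsl1 : PySem.List.slice line (some pos) (some s)
            = (line.drop pos.toNat).take (s.toNat - pos.toNat) :=
          PySem.List.slice_toNat line h0 h0s
        have hsl2 : PySem.List.slice line (some s) (some e)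
            = (line.drop s.toNat).take (e.toNat - s.toNat) :=
          PySem.List.slice_toNat line h0s h0e
        rw [hsl1, hsl2, if_pos hel]
        simp [List.append_assoc]
      · -- run reaches the end of the line: no closer, empty tail, no further runs visible
        rw [not_lt] at hel
        have htail : line.drop e.toNat = [] := List.drop_eq_nil_of_le (by omega)
        have hrs : pvEmitB color line rs e =
            [] := pvEmit_nil_of_ge color line rs e (pvWF_mono rs (e + 1) e (by omega) hwf') hel
        rw [pvEmitB, if_neg (by omega)]
        have hsl1 : PySem.List.slice line (some pos) (some s)
            = (line.drop pos.toNat).take (s.toNat - pos.toNat) :=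
          PySem.List.slice_toNat line h0 h0s
        have hsl2 : PySem.List.slice line (some s) (some e)
            = (line.drop s.toNat).take (e.toNat - s.toNat) :=
          PySem.List.slice_toNat line h0s h0e
        rw [hsl1, hsl2, if_neg (by omega), hrs, htail]
        simp [PySem.List.enumerate, List.append_assoc]

-- runs fold invariant
lemma pvRuns_inv : ∀ (cs : List Char) (k : Int) (acc : List (Int × Int)),
    0 ≤ k → pvWF 0 acc → pvEndsLe acc k →
    pvWF 0 ((PySem.List.enumerate cs k).foldl pvRunStepB acc)
    ∧ pvEndsLe ((PySem.List.enumerate cs k).foldl pvRunStepB acc) (k + cs.length)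
    ∧ (∀ i, pvMemb ((PySem.List.enumerate cs k).foldl pvRunStepB acc) i
        = (pvMemb acc i
           || (PySem.List.enumerate cs k).any
                (fun ic => ic.1 == i && !([' ', '?'] : List Char).contains ic.2))) := by
  intro cs
  induction cs with
  | nil =>
    intro k acc h0 hwf hends
    refine ⟨by simpa [PySem.List.enumerate] using hwf, ?_, ?_⟩
    · simpa [PySem.List.enumerate] using hends
    · intro i; simp [PySem.List.enumerate]
  | cons c cs ih =>
    intro k acc h0 hwf hends
    rw [PySem.List.enumerate_cons]
    simp only [List.foldl_cons, List.any_cons]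
    by_cases hc : ([' ', '?'] : List Char).contains c
    · have hcc : c = ' ' ∨ c = '?' := by simpa using hc
      have hstep : pvRunStepB acc (k, c) = acc := by
        rcases hcc with rfl | rfl <;> rfl
      rw [hstep]
      obtain ⟨w1, w2, w3⟩ := ih (k + 1) acc (by omega) hwf (fun p hp => by
        have := hends p hp; omega)
      refine ⟨w1, ?_, ?_⟩
      · intro p hp
        have := w2 p hp
        simp only [List.length_cons] at *
        push_cast at *
        omega
      · intro i
        rw [w3 i]
        have hh : ((k : Int) == i && !([' ', '?'] : List Char).contains c) = false := by
          rw [hc]; simp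
        rw [hh, Bool.false_or]
    · -- a marked index
      have hcf : ([' ', '?'] : List Char).contains c = false := by
        simpa using hc
      have hacc' : ∃ acc', pvRunStepB acc (k, c) = acc'
          ∧ pvWF 0 acc' ∧ pvEndsLe acc' (k + 1)
          ∧ (∀ i, pvMemb acc' i = (pvMemb acc i || decide (i = k))) := by
        cases hl : acc.getLast? with
        | none =>
          have hnil : acc = [] := List.getLast?_eq_none_iff.mp hl
          refine ⟨[(k, k + 1)], ?_, ⟨h0, by omega, trivial⟩, ?_, ?_⟩
          · subst hnil
            unfold pvRunStepB
            rw [if_neg (by simpa using hc)]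
            rfl
          · intro p hp
            have hp' : p = (k, k + 1) := by simpa using hp
            subst hp'
            exact le_rfl
          · intro i
            subst hnil
            have h1 : pvMemb [] i = false := rfl
            rw [h1, Bool.false_or, pvMemb_cons]
            by_cases hik : i = k
            · subst hik
              simp [pvMemb]
            · have ha : decide (i = k) = false := by simp [hik]
              rw [ha]
              have : pvMemb ([] : List (Int × Int)) i = false := rfl
              rw [this]
              simp only [Bool.or_false, Bool.and_eq_false_iff, decide_eq_false_iff_not]
              omega
        | some p =>
          have hne : acc ≠ [] := by rintro rfl; simp at hl
          have hg : acc.getLast hne = p := by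
            have h := List.getLast?_eq_some_getLast hne
            rw [hl] at h
            exact (Option.some.inj h).symm
          have hacc : acc.dropLast ++ [p] = acc := by
            rw [← hg]; exact List.dropLast_append_getLast hne
          have hpmem : p ∈ acc := by rw [← hg]; exact List.getLast_mem hne
          have hpwf := pvWF_mem_lo acc 0 hwf p hpmem
          have hpend : p.2 ≤ k := hends p hpmem
          have hstep : pvRunStepB acc (k, c)
              = (if p.2 = k then acc.dropLast ++ [(p.1, k + 1)] else acc ++ [(k, k + 1)]) := by
            unfold pvRunStepB
            rw [if_neg (by simpa using hc), hl]
          by_cases hpe : p.2 = k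
          · refine ⟨acc.dropLast ++ [(p.1, k + 1)], by rw [hstep, if_pos hpe], ?_, ?_, ?_⟩
            · apply pvWF_extend acc.dropLast 0 p.1 p.2 (k + 1)
              · rw [show ((p.1, p.2) : Int × Int) = p from rfl, hacc]; exact hwf
              · omega
            · intro q hq
              rcases List.mem_append.mp hq with hq | hq
              · have : q ∈ acc := List.mem_of_mem_dropLast hq
                have := hends q this
                omega
              · have hq' : q = (p.1, k + 1) := by simpa using hq
                subst hq'
                exact le_rfl
            · intro i
              have hmacc : pvMemb acc i
                  = (pvMemb acc.dropLast i || (decide (p.1 ≤ i) && decide (i < p.2))) := by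
                conv_lhs => rw [← hacc]
                simp [pvMemb, List.any_append]
              rw [hmacc]
              have hx : pvMemb (acc.dropLast ++ [(p.1, k + 1)]) i
                  = (pvMemb acc.dropLast i || (decide (p.1 ≤ i) && decide (i < k + 1))) := by
                simp [pvMemb, List.any_append]
              rw [hx]
              cases hb : pvMemb acc.dropLast i
              · by_cases h1 : p.1 ≤ i <;> by_cases h2 : i = k <;>
                  simp [h1, h2] <;> omega
              · simp
          · refine ⟨acc ++ [(k, k + 1)], by rw [hstep, if_neg hpe], ?_, ?_, ?_⟩
            · refine pvWF_snoc acc 0 k (k + 1) hwf h0 ?_ (by omega)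
              intro q hq
              rw [hl] at hq
              have := Option.some.inj hq
              subst this
              omega
            · intro q hq
              rcases List.mem_append.mp hq with hq | hq
              · have := hends q hq; omega
              · have hq' : q = (k, k + 1) := by simpa using hq
                subst hq'
                exact le_rfl
            · intro i
              have hx : pvMemb (acc ++ [(k, k + 1)]) i
                  = (pvMemb acc i || (decide (k ≤ i) && decide (i < k + 1))) := by
                simp [pvMemb, List.any_append]
              rw [hx]
              by_cases hik : i = k <;> simp [hik] <;> omega
      obtain ⟨acc', heq, hwf', hends', hmemb'⟩ := hacc'
      rw [heq]
      obtain ⟨w1, w2, w3⟩ := ih (k + 1) acc' (by omega) hwf' hends'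
      refine ⟨w1, ?_, ?_⟩
      · intro p hp
        have := w2 p hp
        simp only [List.length_cons] at *
        push_cast at *
        omega
      · intro i
        rw [w3 i, hmemb' i]
        have hh : ((k : Int) == i && !([' ', '?'] : List Char).contains c) = decide (i = k) := by
          rw [hcf]
          by_cases hik : k = i
          · simp [hik]
          · have hik' : ¬ i = k := fun hx => hik hx.symm
            simp [hik, hik']
        rw [hh, Bool.or_assoc]

lemma pvRuns_spec (h : List Char) :
    pvWF 0 (pvRunsB h) ∧ ∀ i, pvMemb (pvRunsB h) i = (pvMarksA h).contains i := by
  obtain ⟨w1, _, w3⟩ := pvRuns_inv h 0 [] le_rfl trivial (by intro p hp; simp at hp)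
  refine ⟨w1, fun i => ?_⟩
  rw [show pvRunsB h = (PySem.List.enumerate h).foldl pvRunStepB [] from rfl, w3 i]
  have hnil : pvMemb [] i = false := rfl
  rw [hnil, Bool.false_or]
  apply Bool.coe_iff_coe.mp
  rw [pvMarksA_eq_filter]
  have hcm : ∀ (L : List Int),
      (L.contains i = true) ↔ i ∈ L := fun L => by simp
  rw [hcm]
  simp only [List.any_eq_true, List.mem_map, List.mem_filter, Bool.and_eq_true, beq_iff_eq,
    Bool.not_eq_true']
  constructor
  · rintro ⟨ic, hmem, h1, h2⟩
    exact ⟨ic, ⟨hmem, h2⟩, h1⟩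
  · rintro ⟨ic, ⟨hmem, h2⟩, h1⟩
    exact ⟨ic, hmem, h1, h2⟩

-- B's forward recursion equals A's
lemma pvRender_eq (l : List Char) (runs : List (Int × Int)) (ncs : List Int)
    (hwf : pvWF 0 runs) (hm : ∀ i, ncs.contains i = pvMemb runs i)
    (hneg : ncs.contains (-1) = false) :
    pvRenderLineB l runs
      = "<".toList ++ pvColorA l ++ ">".toList
        ++ (PySem.List.enumerate l).flatMap
            (pvBodyM (fun i => ncs.contains i) (pvColorA l))
        ++ "<END>".toList := by
  show "<".toList ++ pvColorB l ++ ">".toList ++ pvEmitB (pvColorB l) l runs 0 ++ "<END>".toList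
    = _
  rw [pvColorB_eq]
  have := pvEmit_eq (pvColorA l) l runs 0 (fun i => ncs.contains i)
    le_rfl hwf (fun i _ => hm i) (by simpa using hneg)
  simp only [Int.toNat_zero, List.drop_zero] at this
  rw [this]

lemma pvOut_eq_AL : ∀ (ls : List (List Char)), pvOutB ls = pvAL ls := by
  intro ls
  induction ls with
  | nil => rfl
  | cons l rest ih =>
    simp only [pvOutB, pvAL]
    rw [ih]
    congr 1
    cases hq : PySem.Chars.startswith l ['?'] with
    | true => simp
    | false =>
      simp only [Bool.false_eq_true, if_false]
      cases rest with
      | nil =>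
        rw [show pvNextRuns ([] : List (List Char)) = [] from rfl,
          show pvC0 ([] : List (List Char)) = [] from rfl]
        exact pvRender_eq l [] [] trivial (fun i => rfl) rfl
      | cons hd rest' =>
        rw [show pvNextRuns (hd :: rest') = (if PySem.Chars.startswith hd ['?'] then pvRunsB hd
              else []) from rfl,
          show pvC0 (hd :: rest') = pvCarry hd from rfl]
        unfold pvCarry
        cases hq2 : PySem.Chars.startswith hd ['?'] with
        | true =>
          rw [show (if (true : Bool) = true then pvRunsB hd else []) = pvRunsB hd from rfl,
            show (if (true : Bool) = true then pvMarksA hd else []) = pvMarksA hd from rfl]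
          obtain ⟨hwf, hmm⟩ := pvRuns_spec hd
          exact pvRender_eq l (pvRunsB hd) (pvMarksA hd) hwf (fun i => (hmm i).symm)
            (by
              cases hcc : (pvMarksA hd).contains (-1) with
              | false => rfl
              | true =>
                exfalso
                have hmem : (-1 : Int) ∈ pvMarksA hd := by simpa using hcc
                have := pvMarksA_nonneg hd (-1) hmem
                omega)
        | false =>
          rw [show (if (false : Bool) = true then pvRunsB hd else []) = [] from rfl,
            show (if (false : Bool) = true then pvMarksA hd else []) = [] from rfl]
          exact pvRender_eq l [] [] trivial (fun i => rfl) rfl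

-- ===== VERDICT (by name: the statement is the Claim_ definition above) =====
theorem diff_2_cid_print_spec : Claim_equal_diff_2_cid_print := by
  intro lines _
  unfold Spec_diff_2_cid_print diff_2_cid_print_alt
  show String.ofList (PySem.Chars.join ['\n']
      (((PySem.Chars.splitlines lines.toList).reverse.foldl pvStepA ([], [])).1.reverse))
    = String.ofList (PySem.Chars.join ['\n'] (pvOutB (PySem.Chars.splitlines lines.toList)))
  rw [pvFold_eq, pvOut_eq_AL]
  simp
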